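-- pv_equiv track=rewrite | github.com/divyakanth07/Computer-Networks-I-MCA-F | checksum.py | recChecksum
-- ===== SOURCE A (Python) =====
-- def recChecksum(recvMessage, k, checksum):
--     c1 = recvMessage[0:k]
--     c2 = recvMessage[k:2*k]
--     c3 = recvMessage[2*k:3*k]
--     c4 = recvMessage[3*k:4*k]
--
--     recvsum = bin(int(c1, 2) + int(c2, 2) + int(checksum ,2)+int(c3, 2) + int(c4, 2) + int(checksum, 2))[2:]
--
--     while len(recvsum) > k:
--         x = len(recvsum) - k
--         recvsum = bin(int(recvsum[0:x], 2) + int(recvsum[x:], 2))[2:]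
--
--     if len(recvsum) < k:
--         recvsum = '0' * (k - len(recvsum)) + recvsum
--
--     recvchecksum = ''
--     for i in recvsum:
--         if i == '1':
--             recvchecksum += '0'
--         else:
--             recvchecksum += '1'
--     return recvchecksum
-- ===== SOURCE B (Python) =====
-- def recChecksum(recvMessage, k, checksum):
--     total = (int(recvMessage[0:k], 2) + int(recvMessage[k:2*k], 2)
--              + int(recvMessage[2*k:3*k], 2) + int(recvMessage[3*k:4*k], 2)
--              + 2 * int(checksum, 2))
--     m = (1 << k) - 1
--     # end-around-carry folding is reduction modulo 2^k - 1 (with the all-ones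
--     # fixed point for positive multiples of m), so no loop is needed
--     folded = m if total and total % m == 0 else total % m
--     return format(m - folded, '0{}b'.format(k))
-- ===== Notes on version B (the rewrite author's own statement) =====
-- stated objective: alternative
-- what changed: B eliminates A's iterative wraparound loop entirely: end-around-carry folding of a k-bit sum is reduction modulo 2^k-1 (with the all-ones fixed point for positive multiples), so B computes folded = m if total and total % m == 0 else total % m in closed form and returns format(m - folded, '0kb') instead of looping over re-stringified splits and complementing character by character.
-- outside the precondition, e.g. on recChecksum('+1+1+1+1', 2, '1'): A returns '00', B returns '00'; on recChecksum('-1-1-1-0', 2, '01'): A returns '10', B returns '01'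
import Mathlib
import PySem

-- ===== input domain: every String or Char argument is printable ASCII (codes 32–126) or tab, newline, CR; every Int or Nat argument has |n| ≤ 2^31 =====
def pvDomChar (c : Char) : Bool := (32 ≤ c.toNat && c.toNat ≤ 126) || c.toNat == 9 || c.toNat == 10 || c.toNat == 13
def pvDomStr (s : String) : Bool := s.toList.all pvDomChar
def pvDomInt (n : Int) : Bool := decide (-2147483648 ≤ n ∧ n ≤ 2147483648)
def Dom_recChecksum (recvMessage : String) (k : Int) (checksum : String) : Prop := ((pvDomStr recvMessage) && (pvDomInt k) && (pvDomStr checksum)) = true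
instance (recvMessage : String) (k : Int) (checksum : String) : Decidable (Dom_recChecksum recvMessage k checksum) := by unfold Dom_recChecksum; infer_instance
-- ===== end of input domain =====

-- B replaces A's iterative re-stringify-and-split carry loop and character complement loop by a
-- single closed-form modular reduction (end-around carry = reduction mod 2^k - 1) and a
-- subtraction from the all-ones mask (objective: alternative).

-- ---------- shared helper: CPython's int(s, 2) ----------
-- Hand port of int(s, 2) (strip int-whitespace, optional sign, optional 0b/0B prefix with one
-- optional '_' after it, binary digits with single '_' separators). PySem.Int.ofCharsBase? models
-- the same builtin, but its digit-scanner is a private definition the proofs cannot unfold, so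
-- both ports call this explicit transliteration instead. Exact on the stated ASCII domain
-- (fuzz-checked against CPython); both Pythons call the same builtin, so the helper is shared.
def pvBitVal? (c : Char) : Option Nat :=
  if c = '0' then some 0 else if c = '1' then some 1 else none

-- digits after the first one: '_' must sit between two digits
def pvDigits2 : List Char → Nat → Option Nat
  | [], acc => some acc
  | '_' :: rest, acc =>
    match rest with
    | d :: rest' =>
      match pvBitVal? d with
      | some v => pvDigits2 rest' (2 * acc + v)
      | none => none
    | [] => none
  | d :: rest, acc =>
    match pvBitVal? d with
    | some v => pvDigits2 rest (2 * acc + v)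
    | none => none

def pvDigitsVal2? : List Char → Option Nat
  | d :: rest =>
    (match pvBitVal? d with
     | some v => pvDigits2 rest v
     | none => none)
  | [] => none

-- after the optional sign: optional '0b'/'0B' prefix, one optional '_' directly after it
def pvAfterSign (l : List Char) : Option Nat :=
  let l2 :=
    match l with
    | '0' :: 'b' :: t | '0' :: 'B' :: t =>
      match t with
      | '_' :: u => u
      | _ => t
    | _ => l
  pvDigitsVal2? l2

def pvInt2? (s : List Char) : Option Int :=
  let l := ((s.dropWhile PySem.Int.isIntSpace).reverse.dropWhile PySem.Int.isIntSpace).reverse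
  match l with
  | '+' :: r => (pvAfterSign r).map (fun n => (n : Int))
  | '-' :: r => (pvAfterSign r).map (fun n => -(n : Int))
  | _ => (pvAfterSign l).map (fun n => (n : Int))

-- ===== PORT A =====
def pvComplChar (c : Char) : Char := if c = '1' then '0' else '1'

-- A's while loop: split the binary string at x = len - k, re-parse, re-add, re-stringify.
-- fuel makes the recursion structural; the summed value strictly decreases, so the fuel
-- passed by recChecksum (initial value + 1) is enough on every input Pre_ admits.
def pvLoopA (k : Nat) : Nat → List Char → List Char
  | 0, s => s
  | fuel + 1, s =>
    if k < s.length then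
      -- x = len(recvsum) - k; recvsum = bin(int(recvsum[0:x], 2) + int(recvsum[x:], 2))[2:]
      pvLoopA k fuel ((PySem.Int.toBinChars0b
        (((pvInt2? (s.take (s.length - k))).getD 0) + ((pvInt2? (s.drop (s.length - k))).getD 0))).drop 2)
    else s

def recChecksum (recvMessage : String) (k : Int) (checksum : String) : String :=
  let r := recvMessage.toList
  let c1 := PySem.List.slice r (some 0) (some k)
  let c2 := PySem.List.slice r (some k) (some (2 * k))
  let c3 := PySem.List.slice r (some (2 * k)) (some (3 * k))
  let c4 := PySem.List.slice r (some (3 * k)) (some (4 * k))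
  match pvInt2? c1, pvInt2? c2, pvInt2? checksum.toList, pvInt2? c3, pvInt2? c4 with
  | some v1, some v2, some vc, some v3, some v4 =>
    let total := v1 + v2 + vc + v3 + v4 + vc
    let recvsum := (PySem.Int.toBinChars0b total).drop 2       -- bin(total)[2:]
    let s := pvLoopA k.toNat (total.toNat + 1) recvsum
    let s := if s.length < k.toNat then List.replicate (k.toNat - s.length) '0' ++ s else s
    String.ofList (s.map pvComplChar)
  | _, _, _, _, _ => ""   -- some int(…, 2) raised ValueError: outside Pre_

-- ===== PORT B =====
-- B has no loop: folded = m if total and total % m == 0 else total % m; format(m - folded, '0kb')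
def recChecksum_alt (recvMessage : String) (k : Int) (checksum : String) : String :=
  let r := recvMessage.toList
  match pvInt2? (PySem.List.slice r (some 0) (some k)) with
  | none => ""
  | some v1 =>
  match pvInt2? (PySem.List.slice r (some k) (some (2 * k))) with
  | none => ""
  | some v2 =>
  match pvInt2? (PySem.List.slice r (some (2 * k)) (some (3 * k))) with
  | none => ""
  | some v3 =>
  match pvInt2? (PySem.List.slice r (some (3 * k)) (some (4 * k))) with
  | none => ""
  | some v4 =>
  match pvInt2? checksum.toList with
  | none => ""
  | some vc =>
    let total := v1 + v2 + v3 + v4 + 2 * vc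
    let m : Int := (1 <<< k.toNat) - 1                         -- (1 << k) - 1
    let folded : Int :=
      if total ≠ 0 ∧ PySem.Int.mod total m = 0 then m else PySem.Int.mod total m
    PySem.Str.zfill (PySem.Int.toBin (m - folded)) k           -- format(m - folded, '0{k}b')

-- ===== PRECONDITION & SPEC =====
-- Pre_ is closed-form: k >= 1, the message long enough that all four k-bit blocks are nonempty,
-- and the first 4k message characters and the nonempty checksum are plain '0'/'1' bits. A also
-- returns on inputs whose slices int(.., 2) accepts in other spellings (signs, whitespace, '0b'
-- prefixes, '_' separators) - B returns the same value there, they are outside Pre_ only to keep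
-- it closed-form - and on sign-bearing slices whose sum is negative, where A's bin(total)[2:]
-- leaves a stray 'b' character in the result (an artefact B does not reproduce).
def pvIsBit (c : Char) : Bool := c == '0' || c == '1'

def Pre_recChecksum (recvMessage : String) (k : Int) (checksum : String) : Prop :=
  1 ≤ k ∧ 3 * k < (recvMessage.toList.length : Int) ∧
  (recvMessage.toList.take (4 * k).toNat).all pvIsBit = true ∧
  checksum.toList ≠ [] ∧ checksum.toList.all pvIsBit = true

instance (recvMessage : String) (k : Int) (checksum : String) : Decidable (Pre_recChecksum recvMessage k checksum) := by
  unfold Pre_recChecksum; infer_instance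

def pvWitness_recChecksum : String × Int × String := ("1010", 1, "1")

def Spec_recChecksum (recvMessage : String) (k : Int) (checksum : String) (out : String) : Prop := out = recChecksum_alt recvMessage k checksum
instance (recvMessage : String) (k : Int) (checksum : String) (out : String) : Decidable (Spec_recChecksum recvMessage k checksum out) := by unfold Spec_recChecksum; infer_instance

-- ===== CLAIM (what is proved, stated in full; the proofs are below) =====
def Claim_equal_recChecksum : Prop := ∀ (recvMessage : String) (k : Int) (checksum : String), Dom_recChecksum recvMessage k checksum → Pre_recChecksum recvMessage k checksum → Spec_recChecksum recvMessage k checksum (recChecksum recvMessage k checksum)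

-- ===== LEMMAS AND PROOFS =====

-- the numeric skeleton of A's carry loop
def pvNum (k : Nat) : Nat → Nat → Nat
  | 0, v => v
  | fuel + 1, v => if 2 ^ k ≤ v then pvNum k fuel (v / 2 ^ k + v % 2 ^ k) else v

def pvBits (l : List Char) : Prop := ∀ c ∈ l, c = '0' ∨ c = '1'

def pvBinVal (l : List Char) : Nat := l.foldl (fun a c => 2 * a + (if c = '1' then 1 else 0)) 0

theorem pvFoldl_shift (l : List Char) : ∀ a : Nat,
    l.foldl (fun a c => 2 * a + (if c = '1' then 1 else 0)) a = a * 2 ^ l.length + pvBinVal l := by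
  induction l with
  | nil => intro a; simp [pvBinVal]
  | cons c t ih =>
    intro a
    simp only [List.foldl_cons, List.length_cons, pvBinVal] at *
    rw [ih, ih (2 * 0 + _)]
    ring

theorem pvBinVal_cons (c : Char) (t : List Char) :
    pvBinVal (c :: t) = (if c = '1' then 1 else 0) * 2 ^ t.length + pvBinVal t := by
  simp only [pvBinVal, List.foldl_cons]
  rw [pvFoldl_shift]
  simp [pvBinVal]

theorem pvBinVal_append (l₁ l₂ : List Char) :
    pvBinVal (l₁ ++ l₂) = pvBinVal l₁ * 2 ^ l₂.length + pvBinVal l₂ := by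
  simp only [pvBinVal, List.foldl_append]
  rw [pvFoldl_shift]
  rfl

theorem pvBinVal_lt (l : List Char) (h : pvBits l) : pvBinVal l < 2 ^ l.length := by
  induction l with
  | nil => simp [pvBinVal]
  | cons c t ih =>
    have h1 := ih (fun x hx => h x (List.mem_cons_of_mem _ hx))
    have h2 : (if c = '1' then 1 else 0) ≤ 1 := by split <;> omega
    have h3 : 2 ^ (c :: t).length = 2 * 2 ^ t.length := by simp [List.length_cons]; ring
    rw [pvBinVal_cons, h3]
    rcases h2.lt_or_eq with h2 | h2 <;> nlinarith [pow_pos (by norm_num : (0:Nat) < 2) t.length]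

-- bits of toDigits 2 n
theorem pvBits_toDigits (n : Nat) : pvBits (Nat.toDigits 2 n) := by
  induction n using Nat.strong_induction_on with
  | _ n ih =>
    rw [Nat.toDigits_eq_if (by norm_num)]
    split
    · rename_i h
      intro c hc
      simp only [List.mem_singleton] at hc
      subst hc
      interval_cases n <;> decide
    · rename_i h
      intro c hc
      rcases List.mem_append.1 hc with hc | hc
      · exact ih (n / 2) (Nat.div_lt_self (by omega) (by norm_num)) c hc
      · simp only [List.mem_singleton] at hc
        subst hc
        rcases Nat.mod_two_eq_zero_or_one n with hm | hm <;> rw [hm] <;> decide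

theorem pvBinVal_toDigits (n : Nat) : pvBinVal (Nat.toDigits 2 n) = n := by
  induction n using Nat.strong_induction_on with
  | _ n ih =>
    rw [Nat.toDigits_eq_if (by norm_num)]
    split
    · rename_i h; interval_cases n <;> decide
    · rename_i h
      rw [pvBinVal_append, ih (n / 2) (Nat.div_lt_self (by omega) (by norm_num))]
      simp only [List.length_singleton, pow_one]
      have hdm := Nat.div_add_mod n 2
      rcases Nat.mod_two_eq_zero_or_one n with hm | hm <;> rw [hm]
      · have h0 : pvBinVal [Nat.digitChar 0] = 0 := by decide
        omega
      · have h1 : pvBinVal [Nat.digitChar 1] = 1 := by decide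
        omega

-- the parser on a pure nonempty bit string returns exactly its binary value
theorem pvDropWhile_bits (l : List Char) (h : pvBits l) :
    l.dropWhile PySem.Int.isIntSpace = l := by
  cases l with
  | nil => rfl
  | cons c t =>
    rcases h c List.mem_cons_self with rfl | rfl <;>
      simp [PySem.Int.isIntSpace]

theorem pvDigits2_bits (l : List Char) (h : pvBits l) : ∀ acc : Nat,
    pvDigits2 l acc = some (l.foldl (fun a c => 2 * a + (if c = '1' then 1 else 0)) acc) := by
  induction l with
  | nil => intro acc; rfl
  | cons c t ih =>
    intro acc
    have ht : pvBits t := fun x hx => h x (List.mem_cons_of_mem _ hx)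
    rcases h c List.mem_cons_self with rfl | rfl <;>
      simp [pvDigits2, pvBitVal?, ih ht]

theorem pvDigitsVal2?_bits (c : Char) (t : List Char) (h : pvBits (c :: t)) :
    pvDigitsVal2? (c :: t) = some (pvBinVal (c :: t)) := by
  have ht : pvBits t := fun x hx => h x (List.mem_cons_of_mem _ hx)
  rcases h c List.mem_cons_self with rfl | rfl <;>
    simp [pvDigitsVal2?, pvBitVal?, pvDigits2_bits t ht, pvBinVal]

theorem pvInt2?_bits (l : List Char) (hne : l ≠ []) (h : pvBits l) :
    pvInt2? l = some ((pvBinVal l : Nat) : Int) := by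
  unfold pvInt2?
  have hrev : pvBits l.reverse := fun x hx => h x (List.mem_reverse.1 hx)
  rw [pvDropWhile_bits l h, pvDropWhile_bits l.reverse hrev, List.reverse_reverse]
  cases l with
  | nil => exact absurd rfl hne
  | cons c t =>
    rcases h c List.mem_cons_self with rfl | rfl
    · -- head '0': no sign; the 0b/0B prefix needs a 'b'/'B' as second char, a bit can't be one
      cases t with
      | nil => decide
      | cons c2 t2 =>
        have h2 : pvBits (c2 :: t2) := fun x hx => h x (List.mem_cons_of_mem _ hx)
        rcases h2 c2 List.mem_cons_self with rfl | rfl <;>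
          simp [pvAfterSign, pvDigitsVal2?_bits _ _ h]
    · simp [pvAfterSign, pvDigitsVal2?_bits _ _ h]

-- Pre_'s closed-form bit conditions give the parser lemma its hypotheses
theorem pvBits_of_all (l : List Char) (h : l.all pvIsBit = true) : pvBits l := by
  intro c hc
  have h2 := List.all_eq_true.1 h c hc
  simp only [pvIsBit, Bool.or_eq_true, beq_iff_eq] at h2
  exact h2

theorem pvBits_block (r : List Char) (N a b : Nat) (hab : a + b ≤ N)
    (h : (r.take N).all pvIsBit = true) : pvBits ((r.drop a).take b) := by
  intro c hc
  have h1 : c ∈ (r.take (a + b)).drop a := by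
    rw [List.drop_take]
    have hba : a + b - a = b := by omega
    rw [hba]
    exact hc
  have h2 : c ∈ r.take (a + b) := List.mem_of_mem_drop h1
  have h3 : c ∈ r.take N := by
    have he : r.take (a + b) = (r.take N).take (a + b) := by
      rw [List.take_take, Nat.min_eq_left hab]
    exact List.mem_of_mem_take (he ▸ h2)
  exact pvBits_of_all _ h c h3

theorem pvBlock_ne (r : List Char) (a b : Nat) (hb : 1 ≤ b) (ha : a < r.length) :
    (r.drop a).take b ≠ [] := by
  intro hnil
  have hl := congrArg List.length hnil
  simp only [List.length_take, List.length_drop, List.length_nil] at hl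
  omega

-- A's string loop is the numeric loop in binary clothing
theorem pvLoopA_eq (k : Nat) (hk : 1 ≤ k) : ∀ (fuel v : Nat),
    pvLoopA k fuel (Nat.toDigits 2 v) = Nat.toDigits 2 (pvNum k fuel v) := by
  intro fuel
  induction fuel with
  | zero => intro v; rfl
  | succ fuel ih =>
    intro v
    have hlen : k < (Nat.toDigits 2 v).length ↔ 2 ^ k ≤ v := by
      rw [← Nat.not_lt, ← Nat.length_toDigits_le_iff (by norm_num) (by omega)]; omega
    by_cases hv : 2 ^ k ≤ v
    · have hklen : k < (Nat.toDigits 2 v).length := hlen.2 hv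
      rw [pvLoopA, if_pos hklen, pvNum, if_pos hv]
      set D := Nat.toDigits 2 v with hD
      set x := D.length - k with hx
      have hbits : pvBits D := pvBits_toDigits v
      have hbt : pvBits (D.take x) := fun c hc => hbits c (List.mem_of_mem_take hc)
      have hbd : pvBits (D.drop x) := fun c hc => hbits c (List.mem_of_mem_drop hc)
      have hlt : (D.take x).length = x := by
        rw [List.length_take]; omega
      have hld : (D.drop x).length = k := by
        rw [List.length_drop]; omega
      have htne : D.take x ≠ [] := by
        intro hnil; rw [← List.length_eq_zero_iff] at hnil; omega
      have hdne : D.drop x ≠ [] := by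
        intro hnil; rw [← List.length_eq_zero_iff] at hnil; omega
      -- values of the two halves
      have happ := pvBinVal_append (D.take x) (D.drop x)
      rw [List.take_append_drop, hld] at happ
      have hsplit : pvBinVal (D.take x) * 2 ^ k + pvBinVal (D.drop x) = v := by
        rw [← happ, hD, pvBinVal_toDigits]
      have hdlt : pvBinVal (D.drop x) < 2 ^ k := by
        have := pvBinVal_lt (D.drop x) hbd; rwa [hld] at this
      have hsplit' : pvBinVal (D.drop x) + 2 ^ k * pvBinVal (D.take x) = v := by
        rw [Nat.mul_comm]; omega
      have huniq : v / 2 ^ k = pvBinVal (D.take x) ∧ v % 2 ^ k = pvBinVal (D.drop x) :=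
        (Nat.div_mod_unique (Nat.two_pow_pos k)).2 ⟨hsplit', hdlt⟩
      rw [pvInt2?_bits _ htne hbt, pvInt2?_bits _ hdne hbd]
      have hcast : ((pvBinVal (D.take x) : Int) + (pvBinVal (D.drop x) : Int)) =
          ((pvBinVal (D.take x) + pvBinVal (D.drop x) : Nat) : Int) := by push_cast; ring
      simp only [Option.getD_some, hcast]
      rw [show PySem.Int.toBinChars0b ((pvBinVal (D.take x) + pvBinVal (D.drop x) : Nat) : Int)
            = '0' :: 'b' :: Nat.toDigits 2 (pvBinVal (D.take x) + pvBinVal (D.drop x)) by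
        unfold PySem.Int.toBinChars0b
        rw [if_neg (not_lt.2 (Int.natCast_nonneg _))]
        rw [Int.toNat_natCast]]
      rw [List.drop_succ_cons, List.drop_succ_cons, List.drop_zero]
      rw [huniq.1, huniq.2] at *
      exact ih _
    · rw [pvLoopA, if_neg (fun hc => hv (hlen.1 hc)), pvNum, if_neg hv]

-- with fuel v + 1 the numeric loop has finished folding: result < 2^k
theorem pvNum_lt (k : Nat) (hk : 1 ≤ k) : ∀ (fuel v : Nat), v < fuel → pvNum k fuel v < 2 ^ k := by
  intro fuel
  induction fuel with
  | zero => omega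
  | succ fuel ih =>
    intro v hv
    rw [pvNum]
    split
    · rename_i h
      apply ih
      have hpos : 2 ≤ 2 ^ k := by
        calc 2 = 2 ^ 1 := by norm_num
        _ ≤ 2 ^ k := Nat.pow_le_pow_right (by norm_num) hk
      have hd1 : 1 ≤ v / 2 ^ k := (Nat.one_le_div_iff (by omega)).2 h
      have hdm := Nat.div_add_mod v (2 ^ k)
      have h2d : 2 * (v / 2 ^ k) ≤ 2 ^ k * (v / 2 ^ k) := Nat.mul_le_mul_right _ hpos
      omega
    · rename_i h; omega

-- each fold step preserves the value mod 2^k - 1 (v = q*(M+1)+r ≡ q+r)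
theorem pvNum_mod (k : Nat) : ∀ (fuel v : Nat),
    pvNum k fuel v % (2 ^ k - 1) = v % (2 ^ k - 1) := by
  intro fuel
  induction fuel with
  | zero => intro v; rfl
  | succ fuel ih =>
    intro v
    rw [pvNum]
    split
    · rename_i h
      rw [ih]
      set M := 2 ^ k - 1 with hM
      set P := 2 ^ k with hP
      set q := v / P with hq
      have h1 : 1 ≤ P := Nat.one_le_two_pow
      have hdm := Nat.div_add_mod v P
      rw [← hq] at hdm
      have hqM : q * M + q = q * P := by
        rw [hM, Nat.mul_sub, Nat.mul_one]
        have : q ≤ q * P := Nat.le_mul_of_pos_right _ (by omega)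
        omega
      have hcm : P * q = q * P := Nat.mul_comm _ _
      have hv : v = (q + v % P) + q * M := by omega
      conv_rhs => rw [hv]
      rw [Nat.add_mul_mod_self_right]
    · rfl

-- each fold step keeps the value positive
theorem pvNum_pos (k : Nat) : ∀ (fuel v : Nat), 0 < v → 0 < pvNum k fuel v := by
  intro fuel
  induction fuel with
  | zero => intro v hv; exact hv
  | succ fuel ih =>
    intro v hv
    rw [pvNum]
    split
    · rename_i h
      apply ih
      have : 1 ≤ v / 2 ^ k := (Nat.one_le_div_iff (Nat.two_pow_pos k)).2 h
      omega
    · exact hv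

theorem pvNum_zero (k : Nat) : ∀ fuel : Nat, pvNum k fuel 0 = 0 := by
  intro fuel
  cases fuel with
  | zero => rfl
  | succ fuel =>
    rw [pvNum, if_neg (by have := Nat.two_pow_pos k; omega)]

-- the fully folded value is exactly B's closed form
theorem pvNum_closed (k : Nat) (hk : 1 ≤ k) (T : Nat) :
    pvNum k (T + 1) T = if T ≠ 0 ∧ T % (2 ^ k - 1) = 0 then 2 ^ k - 1 else T % (2 ^ k - 1) := by
  set M := 2 ^ k - 1 with hM
  have hM1 : 1 ≤ M := by
    have : 2 ≤ 2 ^ k := by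
      calc 2 = 2 ^ 1 := by norm_num
      _ ≤ 2 ^ k := Nat.pow_le_pow_right (by norm_num) hk
    omega
  set w := pvNum k (T + 1) T with hw
  have hlt : w < 2 ^ k := pvNum_lt k hk (T + 1) T (by omega)
  have hmod : w % M = T % M := pvNum_mod k (T + 1) T
  by_cases hT : T = 0
  · subst hT
    rw [hw, pvNum_zero]
    simp
  · have hpos : 0 < w := pvNum_pos k (T + 1) T (by omega)
    by_cases hTm : T % M = 0
    · rw [if_pos ⟨hT, hTm⟩]
      -- 0 < w ≤ M and w % M = 0 forces w = M
      rw [hTm] at hmod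
      by_cases hwM : w = M
      · exact hwM
      · have : w < M := by omega
        rw [Nat.mod_eq_of_lt this] at hmod
        omega
    · rw [if_neg (fun hc => hTm hc.2)]
      have hwM : w ≠ M := by
        intro hc
        rw [hc, Nat.mod_self] at hmod
        exact hTm hmod.symm
      have : w < M := by omega
      rw [Nat.mod_eq_of_lt this] at hmod
      omega

-- k-wide zero-padded binary of n (the string both programs hold just before the final step)
def pvPadBin (k n : Nat) : List Char := List.replicate (k - (Nat.toDigits 2 n).length) '0' ++ Nat.toDigits 2 n

theorem pvPadBin_succ (k n : Nat) (hk : 1 ≤ k) :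
    pvPadBin (k + 1) n = pvPadBin k (n / 2) ++ [(n % 2).digitChar] := by
  unfold pvPadBin
  by_cases hn : n < 2
  · rw [Nat.toDigits_of_lt_base hn]
    have h0 : n / 2 = 0 := Nat.div_eq_of_lt hn
    have hm : n % 2 = n := Nat.mod_eq_of_lt hn
    rw [h0, hm, show Nat.toDigits 2 0 = ['0'] from rfl]
    simp only [List.length_singleton]
    rw [show k + 1 - 1 = (k - 1) + 1 by omega, List.replicate_succ']
  · rw [Nat.toDigits_eq_if (b := 2) (by norm_num), if_neg (by omega)]
    rw [List.length_append, List.length_singleton]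
    rw [show k + 1 - ((Nat.toDigits 2 (n / 2)).length + 1) = k - (Nat.toDigits 2 (n / 2)).length by omega]
    simp [List.append_assoc]

-- complementing the k-padded binary of n is the k-padded binary of n ^ (2^k - 1)
theorem pvPadBin_compl (k : Nat) (hk : 1 ≤ k) : ∀ n : Nat, n < 2 ^ k →
    (pvPadBin k n).map pvComplChar = pvPadBin k (n ^^^ (2 ^ k - 1)) := by
  induction k with
  | zero => omega
  | succ k ih =>
    intro n hn
    by_cases hk1 : k = 0
    · subst hk1
      interval_cases n <;> decide
    · have hk' : 1 ≤ k := by omega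
      have hM2 : (2 ^ (k + 1) - 1) % 2 = 1 := by
        have : 0 < 2 ^ k := Nat.two_pow_pos k
        have h2 : 2 ^ (k + 1) = 2 * 2 ^ k := by ring
        omega
      have hMd : (2 ^ (k + 1) - 1) / 2 = 2 ^ k - 1 := by
        have : 0 < 2 ^ k := Nat.two_pow_pos k
        have h2 : 2 ^ (k + 1) = 2 * 2 ^ k := by ring
        omega
      rw [pvPadBin_succ k n hk', pvPadBin_succ k _ hk', List.map_append]
      have hxd : (n ^^^ (2 ^ (k + 1) - 1)) / 2 = (n / 2) ^^^ (2 ^ k - 1) := by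
        rw [Nat.xor_div_two, hMd]
      have hxm : (n ^^^ (2 ^ (k + 1) - 1)) % 2 = 1 - n % 2 := by
        rw [Nat.xor_mod_two_eq]
        have := Nat.mod_two_eq_zero_or_one n
        omega
      have hdiv : n / 2 < 2 ^ k := by
        have h2 : 2 ^ (k + 1) = 2 * 2 ^ k := by ring
        omega
      rw [hxd, hxm, ← ih hk' (n / 2) hdiv]
      congr 1
      rcases Nat.mod_two_eq_zero_or_one n with hm | hm <;> rw [hm] <;> decide

-- XOR against the all-ones mask is subtraction from it
theorem pvXor_mask (k : Nat) : ∀ n : Nat, n < 2 ^ k → n ^^^ (2 ^ k - 1) = 2 ^ k - 1 - n := by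
  induction k with
  | zero => intro n hn; interval_cases n; decide
  | succ k ih =>
    intro n hn
    have h2 : 2 ^ (k + 1) = 2 * 2 ^ k := by ring
    have hp : 0 < 2 ^ k := Nat.two_pow_pos k
    have hMd : (2 ^ (k + 1) - 1) / 2 = 2 ^ k - 1 := by omega
    have hM2 : (2 ^ (k + 1) - 1) % 2 = 1 := by omega
    set x := n ^^^ (2 ^ (k + 1) - 1) with hx
    have hxd : x / 2 = (n / 2) ^^^ (2 ^ k - 1) := by
      rw [hx, Nat.xor_div_two, hMd]
    have hxm : x % 2 = 1 - n % 2 := by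
      rw [hx, Nat.xor_mod_two_eq]
      have := Nat.mod_two_eq_zero_or_one n
      omega
    have hdiv : n / 2 < 2 ^ k := by omega
    have := ih (n / 2) hdiv
    rw [this] at hxd
    have hxdm := Nat.div_add_mod x 2
    have hndm := Nat.div_add_mod n 2
    have := Nat.mod_two_eq_zero_or_one n
    omega

-- the unconditional form of A's padding step
theorem pvPad_if (k : Nat) (s : List Char) :
    (if s.length < k then List.replicate (k - s.length) '0' ++ s else s)
      = List.replicate (k - s.length) '0' ++ s := by
  split
  · rfl
  · rename_i h
    rw [show k - s.length = 0 by omega]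
    simp

-- zfill on a string that does not start with a sign is plain left zero-padding
theorem pvZfill_no_sign (cs : List Char) (w : Int)
    (h : ∀ c, cs.head? = some c → ¬(c = '+' ∨ c = '-')) :
    PySem.Chars.zfill cs w = List.replicate (w.toNat - cs.length) '0' ++ cs := by
  unfold PySem.Chars.zfill
  split
  · rename_i hle
    rw [show w.toNat - cs.length = 0 by omega]
    simp
  · cases cs with
    | nil => simp
    | cons c t =>
      have hns := h c rfl
      simp [hns]

theorem pvToDigits_head_no_sign (n : Nat) :
    ∀ c, (Nat.toDigits 2 n).head? = some c → ¬(c = '+' ∨ c = '-') := by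
  intro c hc
  have hmem : c ∈ Nat.toDigits 2 n := by
    cases hD : Nat.toDigits 2 n with
    | nil => rw [hD] at hc; simp at hc
    | cons a t => rw [hD] at hc; simp at hc; simp [hc]
  rcases pvBits_toDigits n c hmem with rfl | rfl <;> decide

-- ===== VERDICT (by name: the statement is the Claim_ definition above) =====
theorem recChecksum_spec : Claim_equal_recChecksum := by
  intro recvMessage k checksum _ hpre
  obtain ⟨hk, hlen, hbits, hcne, hcbits⟩ := hpre
  unfold Spec_recChecksum recChecksum recChecksum_alt
  set rl := recvMessage.toList with hrl
  set kn := k.toNat with hkn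
  have hkn1 : 1 ≤ kn := by omega
  have hlenn : 3 * kn < rl.length := by omega
  -- the four blocks and the checksum are nonempty plain bit strings, so each int(.., 2) parses
  have hsl1 : PySem.List.slice rl (some 0) (some k)
      = (rl.drop (0 : Int).toNat).take (k.toNat - (0 : Int).toNat) :=
    PySem.List.slice_toNat rl (by omega) (by omega)
  have hsl2 : PySem.List.slice rl (some k) (some (2 * k))
      = (rl.drop k.toNat).take ((2 * k).toNat - k.toNat) :=
    PySem.List.slice_toNat rl (by omega) (by omega)
  have hsl3 : PySem.List.slice rl (some (2 * k)) (some (3 * k))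
      = (rl.drop (2 * k).toNat).take ((3 * k).toNat - (2 * k).toNat) :=
    PySem.List.slice_toNat rl (by omega) (by omega)
  have hsl4 : PySem.List.slice rl (some (3 * k)) (some (4 * k))
      = (rl.drop (3 * k).toNat).take ((4 * k).toNat - (3 * k).toNat) :=
    PySem.List.slice_toNat rl (by omega) (by omega)
  have hp1 : pvInt2? (PySem.List.slice rl (some 0) (some k))
      = some ((pvBinVal (PySem.List.slice rl (some 0) (some k)) : Nat) : Int) :=
    pvInt2?_bits _ (by rw [hsl1]; exact pvBlock_ne rl _ _ (by omega) (by omega))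
      (by rw [hsl1]; exact pvBits_block rl ((4 * k).toNat) _ _ (by omega) hbits)
  have hp2 : pvInt2? (PySem.List.slice rl (some k) (some (2 * k)))
      = some ((pvBinVal (PySem.List.slice rl (some k) (some (2 * k))) : Nat) : Int) :=
    pvInt2?_bits _ (by rw [hsl2]; exact pvBlock_ne rl _ _ (by omega) (by omega))
      (by rw [hsl2]; exact pvBits_block rl ((4 * k).toNat) _ _ (by omega) hbits)
  have hp3 : pvInt2? (PySem.List.slice rl (some (2 * k)) (some (3 * k)))
      = some ((pvBinVal (PySem.List.slice rl (some (2 * k)) (some (3 * k))) : Nat) : Int) :=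
    pvInt2?_bits _ (by rw [hsl3]; exact pvBlock_ne rl _ _ (by omega) (by omega))
      (by rw [hsl3]; exact pvBits_block rl ((4 * k).toNat) _ _ (by omega) hbits)
  have hp4 : pvInt2? (PySem.List.slice rl (some (3 * k)) (some (4 * k)))
      = some ((pvBinVal (PySem.List.slice rl (some (3 * k)) (some (4 * k))) : Nat) : Int) :=
    pvInt2?_bits _ (by rw [hsl4]; exact pvBlock_ne rl _ _ (by omega) (by omega))
      (by rw [hsl4]; exact pvBits_block rl ((4 * k).toNat) _ _ (by omega) hbits)
  have hpc : pvInt2? checksum.toList = some ((pvBinVal checksum.toList : Nat) : Int) :=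
    pvInt2?_bits _ hcne (pvBits_of_all _ hcbits)
  simp only [hp1, hp2, hpc, hp3, hp4]
  set N1 := pvBinVal (PySem.List.slice rl (some 0) (some k)) with hN1
  set N2 := pvBinVal (PySem.List.slice rl (some k) (some (2 * k))) with hN2
  set N3 := pvBinVal (PySem.List.slice rl (some (2 * k)) (some (3 * k))) with hN3
  set N4 := pvBinVal (PySem.List.slice rl (some (3 * k)) (some (4 * k))) with hN4
  set NC := pvBinVal checksum.toList with hNC
  -- both totals are the same integer
  have htot : (N1 : Int) + N2 + NC + N3 + N4 + NC = (N1 : Int) + N2 + N3 + N4 + 2 * NC := by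
    ring
  rw [htot]
  set total : Int := (N1 : Int) + N2 + N3 + N4 + 2 * NC with htotdef
  have hsum : 0 ≤ total := by positivity
  set T := total.toNat with hT
  have hTc : total = ((T : Nat) : Int) := (Int.toNat_of_nonneg hsum).symm
  set M : Nat := 2 ^ kn - 1 with hMdef
  have hM1 : 1 ≤ M := by
    have : 2 ≤ 2 ^ kn := by
      calc 2 = 2 ^ 1 := by norm_num
      _ ≤ 2 ^ kn := Nat.pow_le_pow_right (by norm_num) hkn1
    omega
  -- A side: the initial string is toDigits 2 T
  have hbin0 : (PySem.Int.toBinChars0b total).drop 2 = Nat.toDigits 2 T := by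
    unfold PySem.Int.toBinChars0b
    rw [hTc, if_neg (not_lt.2 (Int.natCast_nonneg T))]
    simp
  rw [hbin0, pvLoopA_eq kn hkn1 (T + 1) T]
  set w := pvNum kn (T + 1) T with hw
  have hwlt : w < 2 ^ kn := pvNum_lt kn hkn1 (T + 1) T (by omega)
  rw [pvPad_if]
  -- B side: the mask, the mod, the branch
  have hmask : ((1 <<< kn : Nat) : Int) - 1 = ((M : Nat) : Int) := by
    rw [Nat.one_shiftLeft, hMdef]
    have h1 : 1 ≤ 2 ^ kn := Nat.one_le_two_pow
    push_cast [h1]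
    ring
  rw [hTc, hmask]
  have hmodc : PySem.Int.mod ((T : Nat) : Int) ((M : Nat) : Int) = ((T % M : Nat) : Int) :=
    PySem.Int.mod_natCast T M
  rw [hmodc]
  have hne_iff : (((T : Nat) : Int) ≠ 0) ↔ T ≠ 0 := by
    constructor <;> intro h hc <;> exact h (by exact_mod_cast hc)
  have hmz_iff : (((T % M : Nat) : Int) = 0) ↔ T % M = 0 := by
    constructor <;> intro h <;> exact_mod_cast h
  -- the folded Int is the cast of the Nat closed form = cast of w
  have hclosed := pvNum_closed kn hkn1 T
  rw [← hMdef] at hclosed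
  have hfold : (if ((T : Nat) : Int) ≠ 0 ∧ ((T % M : Nat) : Int) = 0
        then ((M : Nat) : Int) else ((T % M : Nat) : Int)) = ((w : Nat) : Int) := by
    rw [hw, hclosed]
    by_cases hc : T ≠ 0 ∧ T % M = 0
    · rw [if_pos ⟨hne_iff.2 hc.1, hmz_iff.2 hc.2⟩, if_pos hc]
    · rw [if_neg (fun hx => hc ⟨hne_iff.1 hx.1, hmz_iff.1 hx.2⟩), if_neg hc]
  rw [hfold]
  -- m - folded = cast of M - w
  have hwM : w ≤ M := by omega
  have hsub : ((M : Nat) : Int) - ((w : Nat) : Int) = ((M - w : Nat) : Int) := by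
    push_cast [hwM]
    ring
  rw [hsub]
  have htb : PySem.Int.toBin ((M - w : Nat) : Int) = String.ofList (Nat.toDigits 2 (M - w)) := by
    unfold PySem.Int.toBin PySem.Int.toBinChars
    rw [if_neg (not_lt.2 (Int.natCast_nonneg _))]
    rw [Int.toNat_natCast]
  rw [htb]
  have hzf : PySem.Str.zfill (String.ofList (Nat.toDigits 2 (M - w))) k
      = String.ofList (PySem.Chars.zfill (Nat.toDigits 2 (M - w)) k) := by
    apply String.toList_injective
    simp [PySem.Str.toList_zfill]
  rw [hzf, pvZfill_no_sign _ _ (pvToDigits_head_no_sign (M - w))]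
  -- A's complemented padded string is the padded binary of w ^^^ M = M - w
  have hfinal : (List.replicate (kn - (Nat.toDigits 2 w).length) '0' ++ Nat.toDigits 2 w).map pvComplChar
      = List.replicate (k.toNat - (Nat.toDigits 2 (M - w)).length) '0' ++ Nat.toDigits 2 (M - w) := by
    have hcompl := pvPadBin_compl kn hkn1 w hwlt
    rw [pvXor_mask kn w hwlt, ← hMdef] at hcompl
    unfold pvPadBin at hcompl
    rw [← hkn]
    exact hcompl
  rw [hfinal]
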